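-- pv_equiv track=rewrite | github.com/Eleazar-lopzm/Tarea01 | ngramas.py | letras_dobles
-- ===== SOURCE A (Python) =====
-- def letras_dobles(datos):
--
--     dobles = {}
--
--     palabras = datos.split(" ")
--
--     for palabra in palabras:
--         for i in range(len(palabra)-1):
--             if palabra[i] == palabra[i+1]:
--                 patron = palabra[i] + palabra[i]
--                 dobles[palabra] = dobles.get(palabra,0) +1
--     return dobles
-- ===== SOURCE B (Python) =====
-- def letras_dobles(datos):
--     dobles = {}
--     for palabra in datos.split(" "):
--         total = 0
--         run = 1
--         for a, b in zip(palabra, palabra[1:]):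
--             if a == b:
--                 run += 1
--             else:
--                 total += run - 1
--                 run = 1
--         total += run - 1
--         if total > 0:
--             dobles[palabra] = dobles.get(palabra, 0) + total
--     return dobles
-- ===== Notes on version B (the rewrite author's own statement) =====
-- stated objective: alternative
-- what changed: Inner per-position adjacency check replaced by a run-length traversal over zipped adjacent pairs that computes each word's whole double-count first, followed by a single guarded dict update per word instead of one dict update per matching pair.
import Mathlib
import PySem

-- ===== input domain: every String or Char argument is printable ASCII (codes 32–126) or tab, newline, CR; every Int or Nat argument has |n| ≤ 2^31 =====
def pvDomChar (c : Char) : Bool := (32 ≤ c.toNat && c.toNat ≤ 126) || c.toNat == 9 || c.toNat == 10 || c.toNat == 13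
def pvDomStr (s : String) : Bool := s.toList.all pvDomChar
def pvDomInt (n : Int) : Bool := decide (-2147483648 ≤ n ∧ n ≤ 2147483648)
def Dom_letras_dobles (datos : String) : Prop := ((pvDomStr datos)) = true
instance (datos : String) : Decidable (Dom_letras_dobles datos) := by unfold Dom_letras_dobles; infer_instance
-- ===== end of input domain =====

-- B replaces the per-index adjacency loop with a run-length pass over zipped adjacent
-- pairs and does a single guarded dict update per word (objective: alternative).

-- ===== PORT A =====
-- inner loop body over i ∈ range(len(palabra)-1); both indices are in range, so the
-- Option equality test on pyGet? is exactly Python's character comparison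
def letras_dobles (datos : String) : List (String × Int) :=
  ((((PySem.Str.split? datos " ").getD []).foldl (fun d palabra =>
      (PySem.List.pyRange 0 ((PySem.Str.len palabra) - 1) 1).foldl (fun d i =>
        if PySem.Str.pyGet? palabra i == PySem.Str.pyGet? palabra (i + 1) then
          d.insert palabra (d.getD palabra 0 + 1)
        else d) d)
    PySem.Dict.empty) : PySem.Dict String Int).items

-- ===== PORT B =====
-- run-length pass of Source B: state (total, run) over zip(palabra, palabra[1:])
def pvTotalRun (palabra : List Char) : Int × Int :=
  (palabra.zip palabra.tail).foldl
    (fun (tr : Int × Int) p => if p.1 == p.2 then (tr.1, tr.2 + 1) else (tr.1 + tr.2 - 1, 1))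
    (0, 1)

-- Source B's final 'total += run - 1'
def pvTotal (palabra : List Char) : Int := (pvTotalRun palabra).1 + (pvTotalRun palabra).2 - 1

def letras_dobles_alt (datos : String) : List (String × Int) :=
  ((((PySem.Str.split? datos " ").getD []).foldl (fun d palabra =>
      if pvTotal palabra.toList > 0 then
        d.insert palabra (d.getD palabra 0 + pvTotal palabra.toList)
      else d)
    PySem.Dict.empty) : PySem.Dict String Int).items

-- ===== PRECONDITION & SPEC =====
def Spec_letras_dobles (datos : String) (out : List (String × Int)) : Prop := out = letras_dobles_alt datos
instance (datos : String) (out : List (String × Int)) : Decidable (Spec_letras_dobles datos out) := by unfold Spec_letras_dobles; infer_instance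

-- ===== CLAIM (what is proved, stated in full; the proofs are below) =====
def Claim_equal_letras_dobles : Prop := ∀ (datos : String), Dom_letras_dobles datos → Spec_letras_dobles datos (letras_dobles datos)

-- ===== LEMMAS AND PROOFS =====

-- B's run-length state: total + run - 1 counts the equal adjacent pairs seen so far
theorem pvTotalRun_invariant (ps : List (Char × Char)) (t r : Int) :
    (ps.foldl (fun (tr : Int × Int) p => if p.1 == p.2 then (tr.1, tr.2 + 1) else (tr.1 + tr.2 - 1, 1)) (t, r)).1
      + (ps.foldl (fun (tr : Int × Int) p => if p.1 == p.2 then (tr.1, tr.2 + 1) else (tr.1 + tr.2 - 1, 1)) (t, r)).2 - 1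
    = t + r - 1 + (ps.countP (fun p => p.1 == p.2) : Int) := by
  induction ps generalizing t r with
  | nil => simp
  | cons p ps ih =>
    rw [List.foldl_cons]
    by_cases h : (p.1 == p.2) = true
    · rw [if_pos h, ih, List.countP_cons, if_pos h]
      push_cast; ring
    · rw [if_neg h, ih, List.countP_cons, if_neg h]
      push_cast; ring

-- repeated 'dobles[w] = dobles.get(w,0)+1' m times collapses to one insert (or nothing)
theorem foldl_insert_inc {γ : Type} (w : String) (l : List γ) (d : PySem.Dict String Int) :
    l.foldl (fun (d : PySem.Dict String Int) _ => d.insert w (d.getD w 0 + 1)) d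
    = if l.length = 0 then d else d.insert w (d.getD w 0 + (l.length : Int)) := by
  induction l generalizing d with
  | nil => simp
  | cons a l ih =>
    simp only [List.foldl_cons, ih]
    by_cases h : l.length = 0
    · simp [h]
    · simp only [h, if_false, List.length_cons]
      rw [PySem.Dict.getD_insert_self, PySem.Dict.insert_insert_self]
      congr 1
      push_cast
      ring

-- A's inner index loop equals a fold over the zipped adjacent pairs
theorem innerA_eq_pairs (w : List Char) (d : PySem.Dict String Int) (k : String) :
    (PySem.List.pyRange 0 ((w.length : Int) - 1) 1).foldl (fun d i =>
        if PySem.List.pyGet? w i == PySem.List.pyGet? w (i + 1) then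
          d.insert k (d.getD k 0 + 1)
        else d) d
    = (w.zip w.tail).foldl (fun d p =>
        if p.1 == p.2 then d.insert k (d.getD k 0 + 1) else d) d := by
  cases w with
  | nil => simp [PySem.List.pyRange_one_eq_nil]
  | cons c cs =>
    have hpl : ((c :: cs).zip (c :: cs).tail).length = (c :: cs).length - 1 := by
      simp [List.length_zip]
    have hlen : ((c :: cs).length : Int) - 1 = (((c :: cs).zip (c :: cs).tail).length : Int) := by
      rw [hpl]; simp
    rw [hlen]
    rw [← PySem.List.foldl_pyRange_zero_pyGetD' ((c :: cs).zip (c :: cs).tail) (' ', ' ')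
        (fun d p => if p.1 == p.2 then d.insert k (d.getD k 0 + 1) else d) d]
    apply PySem.List.foldl_congr_mem
    intro acc i hi
    have hmem := (PySem.List.mem_pyRange_one).1 hi
    have h0 : 0 ≤ i := hmem.1
    have h1 : i < (((c :: cs).zip (c :: cs).tail).length : Int) := hmem.2
    have hlt1 : i < ((c :: cs).length : Int) := by omega
    have hlt2 : i + 1 < ((c :: cs).length : Int) := by omega
    rw [PySem.List.pyGetD_eq_getElem _ (' ', ' ') h0 h1]
    rw [PySem.List.pyGet?_eq_some_getElem _ h0 hlt1]
    rw [PySem.List.pyGet?_eq_some_getElem _ (by omega : (0:Int) ≤ i + 1) hlt2]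
    have hiN : (i + 1).toNat = i.toNat + 1 := by omega
    simp [hiN, List.getElem_zip]

-- adjacent-pair count in a word
def pvPairCount (w : List Char) : Nat := (w.zip w.tail).countP (fun p => p.1 == p.2)

-- the pairs fold with per-pair inserts equals one guarded insert of the count
theorem pairs_fold_eq_guarded (w : List Char) (k : String) (d : PySem.Dict String Int) :
    (w.zip w.tail).foldl (fun d p =>
        if p.1 == p.2 then d.insert k (d.getD k 0 + 1) else d) d
    = if (pvPairCount w : Int) > 0 then d.insert k (d.getD k 0 + (pvPairCount w : Int)) else d := by
  rw [PySem.List.foldl_if_eq_foldl_filter]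
  rw [foldl_insert_inc k]
  have hc : ((w.zip w.tail).filter (fun p => p.1 == p.2)).length = pvPairCount w := by
    simp [pvPairCount, List.countP_eq_length_filter]
  rw [hc]
  by_cases h : pvPairCount w = 0
  · rw [if_pos h, if_neg (by omega)]
  · rw [if_neg h, if_pos (by omega)]

-- B's total at a word is the adjacent-pair count
theorem total_eq_pairCount (w : List Char) : pvTotal w = (pvPairCount w : Int) := by
  unfold pvTotal pvTotalRun pvPairCount
  rw [pvTotalRun_invariant]
  ring

-- ===== VERDICT (by name: the statement is the Claim_ definition above) =====
theorem letras_dobles_spec : Claim_equal_letras_dobles := by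
  intro datos _
  unfold Spec_letras_dobles letras_dobles letras_dobles_alt
  congr 1
  apply PySem.List.foldl_congr_mem
  intro d palabra _
  have hA : PySem.Str.len palabra = (palabra.toList.length : Int) := rfl
  have hget : ∀ i, PySem.Str.pyGet? palabra i = PySem.List.pyGet? palabra.toList i := fun _ => rfl
  simp only [hA, hget]
  rw [innerA_eq_pairs palabra.toList d palabra,
      pairs_fold_eq_guarded palabra.toList palabra d,
      ← total_eq_pairCount palabra.toList]
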